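-- pv_equiv track=rewrite | github.com/DancingOnAir/LeetcodePythonSolution | String/2380_time_needed_to_rearrange_a_binary_string.py | secondsToRemoveOccurrences
-- ===== SOURCE A (Python) =====
-- def secondsToRemoveOccurrences(s: str) -> int:
--     res = pre0 = 0
--     for c in s:
--         if c == '0':
--             pre0 += 1
--         elif pre0:
--             res = max(res + 1, pre0)
--     return res
-- ===== SOURCE B (Python) =====
-- def secondsToRemoveOccurrences(s: str) -> int:
--     # Single backward pass: the answer is the maximum, over each '1' (non-'0' char)
--     # that has some zero before it, of (zeros before it) + (such ones after it).
--     zeros = sum(c == '0' for c in s)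
--     best = later = 0
--     for c in reversed(s):
--         if c == '0':
--             zeros -= 1
--         elif zeros:
--             best = max(best, zeros + later)
--             later += 1
--     return best
-- ===== Notes on version B (the rewrite author's own statement) =====
-- stated objective: alternative
-- what changed: A's forward scan maintains the running max-recurrence res = max(res+1, pre0); B instead counts zeros once, then scans the string backwards and returns the maximum over each qualifying one of (zeros before it) + (qualifying ones after it), a closed-form max with no recurrence.
import Mathlib
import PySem

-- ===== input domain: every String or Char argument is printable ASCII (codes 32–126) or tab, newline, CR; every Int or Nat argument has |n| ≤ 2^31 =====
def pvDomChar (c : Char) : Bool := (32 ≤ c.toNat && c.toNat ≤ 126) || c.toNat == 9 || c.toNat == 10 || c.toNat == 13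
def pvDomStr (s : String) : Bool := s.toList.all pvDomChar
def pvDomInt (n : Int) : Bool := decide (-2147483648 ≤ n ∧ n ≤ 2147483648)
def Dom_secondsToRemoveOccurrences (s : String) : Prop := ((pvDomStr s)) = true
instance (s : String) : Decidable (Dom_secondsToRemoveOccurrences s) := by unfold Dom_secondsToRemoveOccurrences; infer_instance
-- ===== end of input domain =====

-- B replaces A's forward max-recurrence with a single backward pass taking the max of
-- (zeros before each qualifying one) + (qualifying ones after it); objective: alternative.

-- ===== PORT A =====
-- state = (res, pre0); literal transliteration of A's loop
def pvAStep (st : Int × Int) (c : Char) : Int × Int :=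
  if c == '0' then (st.1, st.2 + 1)
  else if st.2 != 0 then (max (st.1 + 1) st.2, st.2)
  else st

def secondsToRemoveOccurrences (s : String) : Int :=
  (s.toList.foldl pvAStep (0, 0)).1

-- ===== PORT B =====
-- state = (zeros, best, later); literal transliteration of Source B's backward loop
def pvBStep (st : Int × Int × Int) (c : Char) : Int × Int × Int :=
  if c == '0' then (st.1 - 1, st.2.1, st.2.2)
  else if st.1 != 0 then (st.1, max st.2.1 (st.1 + st.2.2), st.2.2 + 1)
  else st

def secondsToRemoveOccurrences_alt (s : String) : Int :=
  let zeros : Int := s.toList.foldl (fun acc c => if c == '0' then acc + 1 else acc) 0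
  (s.toList.reverse.foldl pvBStep (zeros, 0, 0)).2.1

-- ===== PRECONDITION & SPEC =====
def Spec_secondsToRemoveOccurrences (s : String) (out : Int) : Prop := out = secondsToRemoveOccurrences_alt s
instance (s : String) (out : Int) : Decidable (Spec_secondsToRemoveOccurrences s out) := by unfold Spec_secondsToRemoveOccurrences; infer_instance

-- ===== CLAIM (what is proved, stated in full; the proofs are below) =====
def Claim_equal_secondsToRemoveOccurrences : Prop := ∀ (s : String), Dom_secondsToRemoveOccurrences s → Spec_secondsToRemoveOccurrences s (secondsToRemoveOccurrences s)

-- ===== LEMMAS AND PROOFS =====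

-- pvQ l p = number of non-'0' chars of l that have some zero before them (p zeros precede l)
def pvQ : List Char → Int → Int
  | [], _ => 0
  | c :: t, p => if c == '0' then pvQ t (p + 1) else if p != 0 then pvQ t p + 1 else pvQ t p

-- pvM l p = max over such chars of (zeros before it) + (such chars after it); 0 if none
def pvM : List Char → Int → Int
  | [], _ => 0
  | c :: t, p => if c == '0' then pvM t (p + 1) else if p != 0 then max (pvM t p) (p + pvQ t p) else pvM t p

theorem pvQM_nonneg (l : List Char) (p : Int) (hp : 0 ≤ p) :
    0 ≤ pvQ l p ∧ pvQ l p ≤ pvM l p ∧ 0 ≤ pvM l p := by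
  induction l generalizing p with
  | nil => simp [pvQ, pvM]
  | cons c t ih =>
    by_cases h0 : c = '0'
    · simpa [pvQ, pvM, h0] using ih (p + 1) (by omega)
    · by_cases hp0 : p = 0
      · simpa [pvQ, pvM, h0, hp0] using ih p hp
      · have h := ih p hp
        simp only [pvQ, pvM, h0, hp0, beq_iff_eq, if_false, bne_iff_ne, ne_eq,
          not_false_iff, if_true]
        simp only [max_def]
        split_ifs <;> omega

theorem pvA_closed (l : List Char) (res p : Int) (hr : 0 ≤ res) (hp : 0 ≤ p) :
    (l.foldl pvAStep (res, p)).1 = max (res + pvQ l p) (pvM l p) := by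
  induction l generalizing res p with
  | nil => simp [pvQ, pvM]; omega
  | cons c t ih =>
    by_cases h0 : c = '0'
    · simpa [pvAStep, pvQ, pvM, h0] using ih res (p + 1) hr (by omega)
    · by_cases hp0 : p = 0
      · simpa [pvAStep, pvQ, pvM, h0, hp0] using ih res p hr hp
      · have hMQ := pvQM_nonneg t p hp
        have hmain := ih (max (res + 1) p) p (by positivity) hp
        simp only [List.foldl_cons, pvAStep, pvQ, pvM, h0, hp0, beq_iff_eq, if_false,
          bne_iff_ne, ne_eq, not_false_iff, if_true, hmain]
        simp only [max_def]
        split_ifs <;> omega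

theorem pvB_closed (l : List Char) (p : Int) (hp : 0 ≤ p) :
    l.foldr (fun c st => pvBStep st c) ((l.count '0' : Int) + p, 0, 0) = (p, pvM l p, pvQ l p) := by
  induction l generalizing p with
  | nil => simp [pvM, pvQ]
  | cons c t ih =>
    by_cases h0 : c = '0'
    · have hc : ((c :: t).count '0' : Int) + p = (t.count '0' : Int) + (p + 1) := by
        simp [h0]; ring
      rw [List.foldr_cons, hc, ih (p + 1) (by omega)]
      simp [pvBStep, pvM, pvQ, h0]
    · have hc : ((c :: t).count '0' : Int) + p = (t.count '0' : Int) + p := by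
        simp [h0]
      rw [List.foldr_cons, hc, ih p hp]
      by_cases hp0 : p = 0
      · simp [pvBStep, pvM, pvQ, h0, hp0]
      · simp [pvBStep, pvM, pvQ, h0, hp0]

-- ===== VERDICT (by name: the statement is the Claim_ definition above) =====
theorem secondsToRemoveOccurrences_spec : Claim_equal_secondsToRemoveOccurrences := by
  intro s _
  unfold Spec_secondsToRemoveOccurrences secondsToRemoveOccurrences secondsToRemoveOccurrences_alt
  set l := s.toList with hl
  have hz : l.foldl (fun acc c => if c == '0' then acc + 1 else acc) (0 : Int)
      = (l.count '0' : Int) + 0 := by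
    simpa using PySem.List.foldl_beq_add_one (l := l) (v := '0') (a := (0 : Int))
  have hrev : l.reverse.foldl pvBStep ((l.count '0' : Int) + 0, 0, 0)
      = l.foldr (fun c st => pvBStep st c) ((l.count '0' : Int) + 0, 0, 0) :=
    List.foldl_reverse ..
  have hB := pvB_closed l 0 le_rfl
  have hA := pvA_closed l 0 0 le_rfl le_rfl
  have hMQ := pvQM_nonneg l 0 le_rfl
  simp only [hz, hrev, hB, hA]
  omega
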